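-- pv_equiv track=rewrite | github.com/citiral/aoc | 2016/day20.py | handle_exclude
-- ===== SOURCE A (Python) =====
-- def handle_exclude(range, begin, end):
--     new_range = []
--     for r in range:
--         r_begin, r_end = r
--
--         if begin > r_end or end < r_begin:
--             new_range.append((r_begin, r_end))
--         elif begin <= r_begin and end >= r_end:
--             continue
--         else:
--             if begin > r_begin:
--                 new_range.append((r_begin, begin-1))
--             if end < r_end:
--                 new_range.append((end+1, r_end))
--     return new_range
-- ===== SOURCE B (Python) =====
-- def handle_exclude(range, begin, end):
--     def remaining(rb, re):
--         # exclusion misses this range entirely: keep it whole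
--         if begin > re or end < rb:
--             return [(rb, re)]
--         # slice the range at the exclusion boundaries, then drop the
--         # slices that lie inside [begin, end]
--         pieces = []
--         prev = rb
--         for c in (begin - 1, end):
--             if rb <= c <= re - 1:
--                 pieces.append((prev, c))
--                 prev = c + 1
--         pieces.append((prev, re))
--         return [s for s in pieces if not (begin <= s[0] and s[1] <= end)]
--     return [s for r in range for s in remaining(*r)]
-- ===== Notes on version B (the rewrite author's own statement) =====
-- stated objective: alternative
-- what changed: Replaces A's three-way disjoint/covered/partial case analysis with emission of asymmetric left/right pieces by a split-then-filter algorithm: each range not missed by the exclusion is mechanically sliced at the cut points begin-1 and end with a running cursor, and the slices contained in [begin,end] are then dropped.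
import Mathlib
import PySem

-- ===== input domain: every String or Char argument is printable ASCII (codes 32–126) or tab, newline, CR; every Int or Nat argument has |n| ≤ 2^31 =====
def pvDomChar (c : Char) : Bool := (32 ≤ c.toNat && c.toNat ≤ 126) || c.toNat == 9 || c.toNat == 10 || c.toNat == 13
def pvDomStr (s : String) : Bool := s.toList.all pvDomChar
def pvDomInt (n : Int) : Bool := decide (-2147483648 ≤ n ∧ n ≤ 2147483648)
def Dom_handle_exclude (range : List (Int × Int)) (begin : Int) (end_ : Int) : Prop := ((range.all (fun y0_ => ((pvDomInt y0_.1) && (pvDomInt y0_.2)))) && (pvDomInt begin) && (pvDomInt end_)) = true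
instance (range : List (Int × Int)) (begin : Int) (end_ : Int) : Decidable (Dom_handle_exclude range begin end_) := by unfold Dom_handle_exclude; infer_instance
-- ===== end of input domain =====

-- B replaces A's three-way case analysis with split-at-cut-points then drop-contained-slices (objective: alternative; same return value everywhere).

-- ===== PORT A =====
-- one loop iteration of A: the three-way branch, appending to new_range
def handle_exclude_step (begin : Int) (end_ : Int) (acc : List (Int × Int)) (r : Int × Int) : List (Int × Int) :=
  let r_begin := r.1
  let r_end := r.2
  if begin > r_end ∨ end_ < r_begin then
    acc ++ [(r_begin, r_end)]
  else if begin ≤ r_begin ∧ end_ ≥ r_end then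
    acc
  else
    let acc := if begin > r_begin then acc ++ [(r_begin, begin - 1)] else acc
    if end_ < r_end then acc ++ [(end_ + 1, r_end)] else acc

def handle_exclude (range : List (Int × Int)) (begin : Int) (end_ : Int) : List (Int × Int) :=
  range.foldl (handle_exclude_step begin end_) []

-- ===== PORT B =====
-- B's helper 'remaining': keep a missed range whole; otherwise slice it at the
-- cut points begin-1 and end with a running cursor, then drop contained slices
def handle_exclude_alt_remaining (begin : Int) (end_ : Int) (rb : Int) (re : Int) : List (Int × Int) :=
  if begin > re ∨ end_ < rb then
    [(rb, re)]
  else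
    let st := [begin - 1, end_].foldl
      (fun (st : Int × List (Int × Int)) c =>
        if rb ≤ c ∧ c ≤ re - 1 then (c + 1, st.2 ++ [(st.1, c)]) else st)
      (rb, [])
    let pieces := st.2 ++ [(st.1, re)]
    pieces.filter (fun s => decide (¬ (begin ≤ s.1 ∧ s.2 ≤ end_)))

def handle_exclude_alt (range : List (Int × Int)) (begin : Int) (end_ : Int) : List (Int × Int) :=
  range.flatMap (fun r => handle_exclude_alt_remaining begin end_ r.1 r.2)

-- ===== PRECONDITION & SPEC =====
def Spec_handle_exclude (range : List (Int × Int)) (begin : Int) (end_ : Int) (out : List (Int × Int)) : Prop := out = handle_exclude_alt range begin end_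
instance (range : List (Int × Int)) (begin : Int) (end_ : Int) (out : List (Int × Int)) : Decidable (Spec_handle_exclude range begin end_ out) := by unfold Spec_handle_exclude; infer_instance

-- ===== CLAIM (what is proved, stated in full; the proofs are below) =====
def Claim_equal_handle_exclude : Prop := ∀ (range : List (Int × Int)) (begin : Int) (end_ : Int), Dom_handle_exclude range begin end_ → Spec_handle_exclude range begin end_ (handle_exclude range begin end_)

-- ===== LEMMAS AND PROOFS =====

-- each iteration of A appends exactly the pieces B's 'remaining' yields for that range
theorem step_eq_remaining (begin end_ : Int) (acc : List (Int × Int)) (r : Int × Int) :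
    handle_exclude_step begin end_ acc r
      = acc ++ handle_exclude_alt_remaining begin end_ r.1 r.2 := by
  obtain ⟨rb, re⟩ := r
  simp only [handle_exclude_step, handle_exclude_alt_remaining, List.foldl]
  by_cases h1 : begin > re ∨ end_ < rb
  · simp only [if_pos h1]
  · simp only [if_neg h1]
    by_cases c1 : rb ≤ begin - 1 ∧ begin - 1 ≤ re - 1
    · by_cases c2 : rb ≤ end_ ∧ end_ ≤ re - 1
      · -- both cuts land: pieces (rb,begin-1),(begin,end_),(end_+1,re); middle dropped
        have hc : ¬ (begin ≤ rb ∧ end_ ≥ re) := by omega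
        have hb : begin > rb := by omega
        have he : end_ < re := by omega
        simp only [if_neg hc, if_pos c1, if_pos c2, if_pos hb, if_pos he,
          List.nil_append, List.cons_append, List.append_assoc,
          List.filter_cons, List.filter_nil]
        split_ifs <;> simp_all <;> omega
      · -- only left cut: pieces (rb,begin-1),(begin,re); second dropped
        have hc : ¬ (begin ≤ rb ∧ end_ ≥ re) := by omega
        have hb : begin > rb := by omega
        have he : ¬ end_ < re := by omega
        simp only [if_neg hc, if_pos c1, if_neg c2, if_pos hb, if_neg he,
          List.nil_append, List.cons_append, List.append_assoc,
          List.filter_cons, List.filter_nil]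
        split_ifs <;> simp_all <;> omega
    · by_cases c2 : rb ≤ end_ ∧ end_ ≤ re - 1
      · -- only right cut: pieces (rb,end_),(end_+1,re); first dropped
        have hb : ¬ begin > rb := by omega
        have he : end_ < re := by omega
        have hc : ¬ (begin ≤ rb ∧ end_ ≥ re) := by omega
        simp only [if_neg hc, if_neg c1, if_pos c2, if_neg hb, if_pos he,
          List.nil_append, List.cons_append, List.append_assoc,
          List.filter_cons, List.filter_nil]
        split_ifs <;> simp_all <;> omega
      · -- no cut lands: the range is covered and dropped
        have hc : begin ≤ rb ∧ end_ ≥ re := by omega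
        simp only [if_pos hc, if_neg c1, if_neg c2,
          List.nil_append, List.filter_cons, List.filter_nil]
        split_ifs <;> simp_all <;> omega

theorem foldl_step_eq (begin end_ : Int) (range : List (Int × Int)) (acc : List (Int × Int)) :
    range.foldl (handle_exclude_step begin end_) acc
      = acc ++ range.flatMap (fun r => handle_exclude_alt_remaining begin end_ r.1 r.2) := by
  induction range generalizing acc with
  | nil => simp
  | cons r rs ih =>
    simp only [List.foldl, List.flatMap_cons, step_eq_remaining, ih, List.append_assoc]

-- ===== VERDICT (by name: the statement is the Claim_ definition above) =====
theorem handle_exclude_spec : Claim_equal_handle_exclude := by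
  intro range begin end_ _
  unfold Spec_handle_exclude handle_exclude handle_exclude_alt
  simpa using foldl_step_eq begin end_ range []
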